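-- pv_equiv track=rewrite | github.com/fullscreen-triangle/four-sided-triangle | app/core/stages/stage4_solution/response_assembler.py | _trim_to_length
-- ===== SOURCE A (Python) =====
-- def _trim_to_length(content: str, max_length: int) -> str:
--     """
--     Trim content to maximum length without cutting in the middle of a section.
--
--     Args:
--         content: Formatted content
--         max_length: Maximum allowed length
--
--     Returns:
--         Trimmed content
--     """
--     if len(content) <= max_length:
--         return content
--
--     # Split into sections
--     sections = content.split("\n\n")
--
--     # Add sections until we reach the limit
--     result = []
--     current_length = 0
--
--     for section in sections:
--         section_length = len(section) + 2  # +2 for the newlines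
--
--         if current_length + section_length > max_length:
--             # Don't add this section if it would exceed the limit
--             break
--
--         result.append(section)
--         current_length += section_length
--
--     # Add a note that content was trimmed
--     if len(result) < len(sections):
--         result.append("\n\n*Note: Some content was omitted due to length limitations.*")
--
--     return "\n\n".join(result)
-- ===== SOURCE B (Python) =====
-- from bisect import bisect_right
--
--
-- def _trim_to_length(content: str, max_length: int) -> str:
--     if len(content) <= max_length:
--         return content
--
--     sections = content.split("\n\n")
--
--     # Table of cumulative character costs (each section costs len + 2).
--     prefix = []
--     total = 0
--     for s in sections:
--         total += len(s) + 2
--         prefix.append(total)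
--
--     # Binary search for the cut point instead of scanning until the budget breaks:
--     # prefix is strictly increasing, so bisect_right finds the number of leading
--     # sections whose cumulative cost stays within max_length.
--     k = bisect_right(prefix, max_length)
--
--     parts = sections[:k]
--     if k < len(sections):
--         parts.append("\n\n*Note: Some content was omitted due to length limitations.*")
--
--     return "\n\n".join(parts)
-- ===== Notes on version B (the rewrite author's own statement) =====
-- stated objective: alternative
-- what changed: Instead of accumulating lengths and breaking out of the section loop, B builds a table of cumulative section costs and locates the cut point by binary search (bisect_right on the strictly increasing prefix sums), then slices once; correct because the prefix sums are monotone.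
import Mathlib
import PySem

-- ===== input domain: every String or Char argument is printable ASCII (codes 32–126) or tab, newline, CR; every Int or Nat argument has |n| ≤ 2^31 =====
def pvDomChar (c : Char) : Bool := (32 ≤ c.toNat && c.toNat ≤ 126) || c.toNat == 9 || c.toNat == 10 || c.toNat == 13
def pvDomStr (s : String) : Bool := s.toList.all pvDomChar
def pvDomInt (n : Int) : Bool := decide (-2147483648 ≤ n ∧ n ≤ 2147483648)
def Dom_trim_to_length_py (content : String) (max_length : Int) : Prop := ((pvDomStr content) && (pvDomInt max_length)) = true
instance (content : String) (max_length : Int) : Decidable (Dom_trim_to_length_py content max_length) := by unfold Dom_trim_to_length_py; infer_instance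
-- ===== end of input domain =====

-- B replaces A's accumulate-and-break loop by a cumulative-cost table and a binary
-- search (bisect_right) for the cut point, then a single slice (alternative algorithm).

-- ===== PORT A =====
def pvNote : String := "\n\n*Note: Some content was omitted due to length limitations.*"

-- A's 'for section in sections: … break' loop, carrying current_length
def pvLoopA (max_length : Int) : List String → Int → List String
  | [], _ => []
  | s :: rest, cur =>
    if cur + (PySem.Str.len s + 2) > max_length then []
    else s :: pvLoopA max_length rest (cur + (PySem.Str.len s + 2))

def trim_to_length_py (content : String) (max_length : Int) : String :=
  if PySem.Str.len content ≤ max_length then content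
  else
    let sections := (PySem.Str.split? content "\n\n").getD []   -- sep ≠ "", so split? is some
    let result := pvLoopA max_length sections 0
    let result := if (result.length : Int) < (sections.length : Int) then result ++ [pvNote] else result
    PySem.Str.join "\n\n" result

-- ===== PORT B =====
def pvNoteB : String := "\n\n*Note: Some content was omitted due to length limitations.*"

-- Source B's prefix-table loop: 'total += len(s)+2; prefix.append(total)'
def pvPrefix (total : Int) : List Int → List Int
  | [] => []
  | x :: xs => (total + x) :: pvPrefix (total + x) xs

-- bisect.bisect_right on a list of ints (CPython's lo/hi halving loop)
def pvBisectRight (l : List Int) (x : Int) (lo hi : Nat) : Nat :=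
  if _h : lo < hi then
    let mid := (lo + hi) / 2
    if x < l.getD mid 0 then pvBisectRight l x lo mid
    else pvBisectRight l x (mid + 1) hi
  else lo
termination_by hi - lo
decreasing_by all_goals omega

def trim_to_length_py_alt (content : String) (max_length : Int) : String :=
  if PySem.Str.len content ≤ max_length then content
  else
    let sections := (PySem.Str.split? content "\n\n").getD []
    let prefixSums := pvPrefix 0 (sections.map (fun s => PySem.Str.len s + 2))
    let k := pvBisectRight prefixSums max_length 0 prefixSums.length
    let parts := sections.take k
    let parts := if (k : Int) < (sections.length : Int) then parts ++ [pvNoteB] else parts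
    PySem.Str.join "\n\n" parts

-- ===== PRECONDITION & SPEC =====
def Spec_trim_to_length_py (content : String) (max_length : Int) (out : String) : Prop := out = trim_to_length_py_alt content max_length
instance (content : String) (max_length : Int) (out : String) : Decidable (Spec_trim_to_length_py content max_length out) := by unfold Spec_trim_to_length_py; infer_instance

-- ===== CLAIM (what is proved, stated in full; the proofs are below) =====
def Claim_equal_trim_to_length_py : Prop := ∀ (content : String) (max_length : Int), Dom_trim_to_length_py content max_length → Spec_trim_to_length_py content max_length (trim_to_length_py content max_length)

-- ===== LEMMAS AND PROOFS =====

-- every cumulative sum of nonnegative terms is at least the starting accumulator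
lemma pvPrefix_ge (xs : List Int) (acc : Int) (hx : ∀ x ∈ xs, 0 ≤ x) :
    ∀ y ∈ pvPrefix acc xs, acc ≤ y := by
  induction xs generalizing acc with
  | nil => simp [pvPrefix]
  | cons x xs ih =>
    intro y hy
    have hx0 : 0 ≤ x := hx x (by simp)
    simp only [pvPrefix, List.mem_cons] at hy
    rcases hy with rfl | hy
    · omega
    · have := ih (acc + x) (fun z hz => hx z (by simp [hz])) y hy
      omega

-- A's break-loop equals taking the first k sections, k = number of prefix sums within the limit
lemma pvLoopA_eq_take (max_length : Int) (sections : List String) (cur : Int) :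
    pvLoopA max_length sections cur =
      sections.take ((pvPrefix cur (sections.map (fun s => PySem.Str.len s + 2))).countP
        (fun c => c ≤ max_length)) := by
  induction sections generalizing cur with
  | nil => simp [pvLoopA, pvPrefix]
  | cons s rest ih =>
    have hterm : ∀ x ∈ (s :: rest).map (fun s => PySem.Str.len s + 2), 0 ≤ x := by
      intro x hx
      simp only [List.mem_map] at hx
      obtain ⟨t, _, rfl⟩ := hx
      have : 0 ≤ PySem.Str.len t := by simp [PySem.Str.len_eq]
      omega
    by_cases h : cur + (PySem.Str.len s + 2) > max_length
    · have hall : ∀ y ∈ pvPrefix cur ((s :: rest).map (fun t => PySem.Str.len t + 2)),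
          ¬ (y ≤ max_length) := by
        intro y hy
        simp only [List.map_cons, pvPrefix, List.mem_cons] at hy
        rcases hy with rfl | hy
        · omega
        · have := pvPrefix_ge _ _ (fun z hz => hterm z (by simp only [List.map_cons, List.mem_cons]; right; exact hz)) y hy
          omega
      have hcount : (pvPrefix cur ((s :: rest).map (fun t => PySem.Str.len t + 2))).countP
          (fun c => c ≤ max_length) = 0 := by
        rw [List.countP_eq_zero]
        intro y hy
        simpa using hall y hy
      simp [PySem.Str.len_eq] at h hcount
      simp [pvLoopA, h]
      exact hcount
    · have hcount : (pvPrefix cur ((s :: rest).map (fun t => PySem.Str.len t + 2))).countP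
          (fun c => c ≤ max_length)
          = (pvPrefix (cur + (PySem.Str.len s + 2)) (rest.map (fun t => PySem.Str.len t + 2))).countP
              (fun c => c ≤ max_length) + 1 := by
        simp [PySem.Str.len_eq] at h
        simp [pvPrefix, PySem.Str.len_eq, h]
      simp only [pvLoopA, if_neg h, hcount, List.take_succ_cons]
      rw [ih]

lemma pvPrefix_length (xs : List Int) (acc : Int) : (pvPrefix acc xs).length = xs.length := by
  induction xs generalizing acc with
  | nil => simp [pvPrefix]
  | cons x xs ih => simp [pvPrefix, ih]

-- prefix sums of nonnegative terms are pairwise non-decreasing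
lemma pvPrefix_pairwise (xs : List Int) (acc : Int) (hx : ∀ x ∈ xs, 0 ≤ x) :
    (pvPrefix acc xs).Pairwise (fun a b => a ≤ b) := by
  induction xs generalizing acc with
  | nil => simp [pvPrefix]
  | cons x xs ih =>
    simp only [pvPrefix, List.pairwise_cons]
    refine ⟨fun y hy => pvPrefix_ge xs (acc + x) (fun z hz => hx z (by simp [hz])) y hy,
      ih (acc + x) (fun z hz => hx z (by simp [hz]))⟩

-- if the predicate holds exactly on the first r positions, countP = r
lemma countP_of_boundary (p : Int → Bool) :
    ∀ (l : List Int) (r : Nat), r ≤ l.length →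
    (∀ i (h : i < l.length), i < r → p l[i] = true) →
    (∀ i (h : i < l.length), r ≤ i → p l[i] = false) →
    l.countP p = r := by
  intro l
  induction l with
  | nil => intro r hr _ _; simpa using (Nat.le_zero.mp hr).symm
  | cons a l ih =>
    intro r hr h1 h2
    cases r with
    | zero =>
      have ha : p a = false := h2 0 (by simp) (Nat.zero_le _)
      have htail := ih 0 (Nat.zero_le _) (by omega)
        (fun i hi _ => by simpa using h2 (i + 1) (by simpa using Nat.succ_lt_succ hi) (by omega))
      simp [ha, htail]
    | succ r' =>
      have ha : p a = true := h1 0 (by simp) (by omega)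
      have htail := ih r' (by simpa using hr)
        (fun i hi hir => by simpa using h1 (i + 1) (by simpa using Nat.succ_lt_succ hi) (by omega))
        (fun i hi hir => by simpa using h2 (i + 1) (by simpa using Nat.succ_lt_succ hi) (by omega))
      simp [ha, htail]

-- bisect_right on a non-decreasing list computes the count of elements ≤ x
lemma pvBisectRight_eq_countP (l : List Int) (x : Int)
    (hpw : l.Pairwise (fun a b => a ≤ b)) :
    ∀ (n lo hi : Nat), hi - lo ≤ n → lo ≤ hi → hi ≤ l.length →
    (∀ i (h : i < l.length), i < lo → l[i] ≤ x) →
    (∀ i (h : i < l.length), hi ≤ i → ¬ (l[i] ≤ x)) →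
    pvBisectRight l x lo hi = l.countP (fun c => c ≤ x) := by
  intro n
  induction n with
  | zero =>
    intro lo hi hn hlh hhl h1 h2
    have : lo = hi := by omega
    subst this
    rw [pvBisectRight]
    simp only [lt_irrefl, dite_false]
    exact (countP_of_boundary _ l lo (le_trans hlh hhl)
      (fun i hi' hlt => by simpa using h1 i hi' hlt)
      (fun i hi' hge => by simpa using h2 i hi' (le_trans hlh hge))).symm
  | succ n ih =>
    intro lo hi hn hlh hhl h1 h2
    rw [pvBisectRight]
    by_cases hlt : lo < hi
    · simp only [hlt, dite_true]
      have hmid : (lo + hi) / 2 < l.length := by omega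
      have hgd : l.getD ((lo + hi) / 2) 0 = l[(lo + hi) / 2] := List.getD_eq_getElem l 0 hmid
      rw [hgd]
      by_cases hx : x < l[(lo + hi) / 2]
      · simp only [hx, if_true]
        refine ih lo ((lo + hi) / 2) (by omega) (by omega) (by omega) h1 ?_
        intro i hi' hge
        -- l[mid] ≤ l[i] for mid ≤ i, so x < l[i]
        have hmono : l[(lo + hi) / 2] ≤ l[i] := by
          rcases Nat.lt_or_ge ((lo + hi) / 2) i with hlt' | hge'
          · exact (List.pairwise_iff_getElem.mp hpw) _ _ hmid hi' hlt'
          · have : (lo + hi) / 2 = i := by omega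
            simp [this]
        omega
      · simp only [hx, if_false]
        refine ih ((lo + hi) / 2 + 1) hi (by omega) (by omega) hhl ?_ h2
        intro i hi' hilt
        have hmono : l[i] ≤ l[(lo + hi) / 2] := by
          rcases Nat.lt_or_ge i ((lo + hi) / 2) with hlt' | hge'
          · exact (List.pairwise_iff_getElem.mp hpw) _ _ hi' hmid hlt'
          · have : i = (lo + hi) / 2 := by omega
            simp [this]
        omega
    · simp only [hlt, dite_false]
      have : lo = hi := by omega
      subst this
      exact (countP_of_boundary _ l lo (le_trans hlh hhl)
        (fun i hi' hlt' => by simpa using h1 i hi' hlt')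
        (fun i hi' hge => by simpa using h2 i hi' (le_trans hlh hge))).symm

lemma pv_count_le_len (max_length : Int) (sections : List String) :
    (pvPrefix 0 (sections.map (fun s => PySem.Str.len s + 2))).countP (fun c => c ≤ max_length)
      ≤ sections.length := by
  calc (pvPrefix 0 (sections.map (fun s => PySem.Str.len s + 2))).countP (fun c => c ≤ max_length)
      ≤ (pvPrefix 0 (sections.map (fun s => PySem.Str.len s + 2))).length := List.countP_le_length
    _ = sections.length := by rw [pvPrefix_length, List.length_map]

-- ===== VERDICT (by name: the statement is the Claim_ definition above) =====
theorem trim_to_length_py_spec : Claim_equal_trim_to_length_py := by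
  intro content max_length _
  unfold Spec_trim_to_length_py trim_to_length_py trim_to_length_py_alt
  by_cases h : PySem.Str.len content ≤ max_length
  · simp [PySem.Str.len_eq] at h
    simp [h]
  · simp only [if_neg h]
    set sections := (PySem.Str.split? content "\n\n").getD [] with hs
    set costs := sections.map (fun s => PySem.Str.len s + 2) with hcosts
    have hnn : ∀ x ∈ costs, 0 ≤ x := by
      intro x hx
      simp only [hcosts, List.mem_map] at hx
      obtain ⟨t, _, rfl⟩ := hx
      have : 0 ≤ PySem.Str.len t := by simp [PySem.Str.len_eq]
      omega
    have hpw := pvPrefix_pairwise costs 0 hnn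
    have hbisect : pvBisectRight (pvPrefix 0 costs) max_length 0 (pvPrefix 0 costs).length
        = (pvPrefix 0 costs).countP (fun c => c ≤ max_length) :=
      pvBisectRight_eq_countP _ _ hpw (pvPrefix 0 costs).length 0 _
        (by omega) (Nat.zero_le _) (le_refl _) (by omega) (by omega)
    have hloop : pvLoopA max_length sections 0
        = sections.take ((pvPrefix 0 costs).countP (fun c => c ≤ max_length)) :=
      pvLoopA_eq_take max_length sections 0
    have hlen : (sections.take ((pvPrefix 0 costs).countP (fun c => c ≤ max_length))).length
        = (pvPrefix 0 costs).countP (fun c => c ≤ max_length) :=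
      List.length_take_of_le (pv_count_le_len max_length sections)
    simp only [hbisect, hloop, hlen, pvNote, pvNoteB]
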